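-- pv_equiv track=rewrite | github.com/SebastianDuda0106/prg-basics | 04-Functions/programs/7.19.py | f
-- ===== SOURCE A (Python) =====
-- def f(number):
--     numbers=[]
--     count=[0,0,0,0,0,0,0,0,0,0]
--     counter=0
--     fnumbers=f"{number}"
--     for i in range(0,len(fnumbers)):
--         if fnumbers[i] in numbers:
--             if count[int(fnumbers[i])]==0:
--                 count[int(fnumbers[i])]+=1
--                 counter+=int(fnumbers[i])*2
--             elif count[int(fnumbers[i])]>0:
--                 count[int(fnumbers[i])]+=1
--                 counter+=int(fnumbers[i])
--         else:
--             numbers.append(fnumbers[i])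
--     return counter
-- ===== SOURCE B (Python) =====
-- def f(number):
--     counts = {}
--     for ch in f"{number}":
--         counts[ch] = counts.get(ch, 0) + 1
--     total = 0
--     for ch, n in counts.items():
--         if n >= 2:
--             total += int(ch) * n
--     return total
-- ===== Notes on version B (the rewrite author's own statement) =====
-- stated objective: simpler
-- what changed: Replaces A's membership list plus fixed per-digit tally array with first/subsequent-occurrence branching by a single frequency dict built in one pass, then one sum over distinct characters with a count of at least two (each repeated digit contributes digit*count).
import Mathlib
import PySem

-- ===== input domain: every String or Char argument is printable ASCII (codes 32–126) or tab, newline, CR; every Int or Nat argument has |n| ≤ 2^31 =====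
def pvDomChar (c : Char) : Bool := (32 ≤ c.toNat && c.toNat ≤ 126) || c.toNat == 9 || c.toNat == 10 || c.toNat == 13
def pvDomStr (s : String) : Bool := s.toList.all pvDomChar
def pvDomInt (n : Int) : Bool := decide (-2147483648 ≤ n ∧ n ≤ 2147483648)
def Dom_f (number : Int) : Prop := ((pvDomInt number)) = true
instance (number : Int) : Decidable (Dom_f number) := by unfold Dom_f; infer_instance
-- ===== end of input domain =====

-- B replaces A's seen-list plus per-digit tally array by one frequency dict and a single
-- sum over distinct characters whose count reaches two (objective: simpler).


-- ===== PORT A =====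
-- int(c) for a digit character c — the only characters on which either Python ever calls int();
-- exact there (both programs reach int() only via a repeated character of str(number), always a digit).
def pyIntDigit (c : Char) : Int := (c.toNat : Int) - 48

-- A's for-loop over f"{number}", carrying its three pieces of state (numbers, count, counter).
-- count[int(c)] is ported with List.getD / List.set: on every reached input the index is 0..9, in range.
def fLoop : List Char → List Char → List Int → Int → Int
  | [], _, _, counter => counter
  | c :: rest, numbers, count, counter =>
    if c ∈ numbers then
      if count.getD (pyIntDigit c).toNat 0 = 0 then
        fLoop rest numbers (count.set (pyIntDigit c).toNat (count.getD (pyIntDigit c).toNat 0 + 1))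
          (counter + pyIntDigit c * 2)
      else if 0 < count.getD (pyIntDigit c).toNat 0 then
        fLoop rest numbers (count.set (pyIntDigit c).toNat (count.getD (pyIntDigit c).toNat 0 + 1))
          (counter + pyIntDigit c)
      else fLoop rest numbers count counter
    else fLoop rest (numbers ++ [c]) count counter

def f (number : Int) : Int :=
  fLoop (PySem.Int.toChars number) [] [0, 0, 0, 0, 0, 0, 0, 0, 0, 0] 0

-- ===== PORT B =====
def f_alt (number : Int) : Int :=
  let counts := (PySem.Int.toChars number).foldl
    (fun d c => d.insert c (d.getD c 0 + 1)) PySem.Dict.empty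
  counts.items.foldl (fun total p => if 2 ≤ p.2 then total + pyIntDigit p.1 * p.2 else total) 0

-- ===== PRECONDITION & SPEC =====
def Spec_f (number : Int) (out : Int) : Prop := out = f_alt number
instance (number : Int) (out : Int) : Decidable (Spec_f number out) := by unfold Spec_f; infer_instance

-- ===== CLAIM (what is proved, stated in full; the proofs are below) =====
def Claim_equal_f : Prop := ∀ (number : Int), Dom_f number → Spec_f number (f number)

-- ===== LEMMAS AND PROOFS =====

-- digit characters '0'..'9', stated on character codes
def isDig (c : Char) : Prop := 48 ≤ c.toNat ∧ c.toNat ≤ 57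

-- the per-character contribution both programs total: d * count when count ≥ 2, else 0
def W (s : List Char) (c : Char) : Int :=
  if 2 ≤ (s.count c : Int) then pyIntDigit c * (s.count c : Int) else 0

theorem char_eq_of_toNat_eq {a b : Char} (h : a.toNat = b.toNat) : a = b := by
  apply Char.ext; exact UInt32.toNat_inj.mp h

theorem pyIntDigit_toNat_inj {c c' : Char} (hc : isDig c) (hc' : isDig c')
    (h : (pyIntDigit c).toNat = (pyIntDigit c').toNat) : c = c' := by
  apply char_eq_of_toNat_eq
  simp only [pyIntDigit] at h
  obtain ⟨h1, h2⟩ := hc; obtain ⟨h3, h4⟩ := hc'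
  omega

theorem pyIntDigit_toNat_lt {c : Char} (hc : isDig c) : (pyIntDigit c).toNat < 10 := by
  obtain ⟨h1, h2⟩ := hc; simp only [pyIntDigit]; omega

theorem digitChar_isDig {k : Nat} (h : k < 10) : isDig (Nat.digitChar k) := by
  interval_cases k <;> exact ⟨by decide, by decide⟩

theorem toDigitsCore_isDig : ∀ (fuel n : Nat) (acc : List Char),
    (∀ c ∈ acc, isDig c) → ∀ c ∈ Nat.toDigitsCore 10 fuel n acc, isDig c := by
  intro fuel
  induction fuel with
  | zero => intro n acc hacc c hc; exact hacc c hc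
  | succ fuel ih =>
    intro n acc hacc c hc
    simp only [Nat.toDigitsCore] at hc
    have hd : ∀ x ∈ (Nat.digitChar (n % 10)) :: acc, isDig x := by
      intro x hx
      rcases List.mem_cons.mp hx with h | h
      · subst h; exact digitChar_isDig (Nat.mod_lt _ (by omega))
      · exact hacc x h
    split at hc
    · exact hd c hc
    · exact ih (n / 10) _ hd c hc

theorem toDigits_isDig (m : Nat) : ∀ c ∈ Nat.toDigits 10 m, isDig c := by
  intro c hc
  exact toDigitsCore_isDig (m + 1) m [] (by simp) c hc

theorem toChars_good (n : Int) : ∀ c ∈ PySem.Int.toChars n, isDig c ∨ c = '-' := by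
  intro c hc
  simp only [PySem.Int.toChars] at hc
  split at hc
  · rcases List.mem_cons.mp hc with h | h
    · exact Or.inr h
    · exact Or.inl (toDigits_isDig _ c h)
  · exact Or.inl (toDigits_isDig _ c hc)

theorem not_isDig_dash : ¬ isDig '-' := by
  intro h
  obtain ⟨h1, _⟩ := h
  revert h1
  decide

theorem toChars_dash (n : Int) : (PySem.Int.toChars n).count '-' ≤ 1 := by
  have hz : ∀ m : Nat, (Nat.toDigits 10 m).count '-' = 0 := by
    intro m
    apply List.count_eq_zero.mpr
    intro h
    exact not_isDig_dash (toDigits_isDig m '-' h)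
  simp only [PySem.Int.toChars]
  split
  · rw [List.count_cons_self, hz]
  · rw [hz]; omega

theorem set_ofList_append_mem {l : List Char} {c : Char} (h : c ∈ l) :
    PySem.Set.ofList (l ++ [c]) = PySem.Set.ofList l := by
  rw [PySem.Set.ofList_eq_foldl, List.foldl_append, ← PySem.Set.ofList_eq_foldl]
  simp [PySem.Set.add, PySem.Set.contains, PySem.Set.mem_ofList, h]

theorem set_ofList_append_not_mem {l : List Char} {c : Char} (h : ¬ c ∈ l) :
    PySem.Set.ofList (l ++ [c]) = PySem.Set.ofList l ++ [c] := by
  rw [PySem.Set.ofList_eq_foldl, List.foldl_append, ← PySem.Set.ofList_eq_foldl]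
  simp [PySem.Set.add, PySem.Set.contains, PySem.Set.mem_ofList, h]

-- changing a nodup list's summand at exactly one member shifts the sum by the difference there
theorem sum_map_update (l : List Char) (f g : Char → Int) (c : Char)
    (hnd : l.Nodup) (hc : c ∈ l) (hfg : ∀ x ∈ l, x ≠ c → f x = g x) :
    (l.map g).sum = (l.map f).sum + (g c - f c) := by
  induction l with
  | nil => cases hc
  | cons a t ih =>
    rcases List.mem_cons.mp hc with h | h
    · subst h
      have : t.map g = t.map f := by
        apply List.map_congr_left
        intro x hx
        exact (hfg x (List.mem_cons_of_mem _ hx) (fun he => (List.nodup_cons.mp hnd).1 (he ▸ hx))).symm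
      simp [this]; ring
    · have hne : a ≠ c := fun he => (List.nodup_cons.mp hnd).1 (he ▸ h)
      have := ih (List.nodup_cons.mp hnd).2 h
        (fun x hx hxc => hfg x (List.mem_cons_of_mem _ hx) hxc)
      simp only [List.map_cons, List.sum_cons, this, hfg a List.mem_cons_self hne]
      ring

theorem f_alt_eq (n : Int) :
    f_alt n = ((PySem.Set.ofList (PySem.Int.toChars n)).map (W (PySem.Int.toChars n))).sum := by
  show (((PySem.Int.toChars n).foldl (fun d c => d.insert c (d.getD c 0 + 1))
      PySem.Dict.empty).items.foldl
      (fun total p => if 2 ≤ p.2 then total + pyIntDigit p.1 * p.2 else total) 0) = _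
  rw [PySem.Dict.foldl_insert_getD_add_one_eq_counter, PySem.Dict.items_counter, List.foldl_map]
  have hfun : (fun (total : Int) (k : Char) =>
      if 2 ≤ ((PySem.Int.toChars n).count k : Int)
      then total + pyIntDigit k * ((PySem.Int.toChars n).count k : Int) else total)
      = fun total k => total + W (PySem.Int.toChars n) k := by
    funext total k
    simp only [W]
    split <;> simp
  rw [hfun, PySem.List.foldl_add]
  simp

-- the loop invariant for A: numbers is the set of characters seen, count[d] = max(seen count - 1, 0)
-- per digit, counter is the partial weighted sum
theorem fLoop_inv : ∀ (rest p : List Char) (count : List Int),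
    (∀ c ∈ p ++ rest, isDig c ∨ c = '-') →
    (p ++ rest).count '-' ≤ 1 →
    count.length = 10 →
    (∀ c : Char, isDig c → count.getD (pyIntDigit c).toNat 0 = max ((p.count c : Int) - 1) 0) →
    fLoop rest (PySem.Set.ofList p) count (((PySem.Set.ofList p).map (W p)).sum)
      = ((PySem.Set.ofList (p ++ rest)).map (W (p ++ rest))).sum := by
  intro rest
  induction rest with
  | nil => intro p count _ _ _ _; simp [fLoop]
  | cons c rest ih =>
    intro p count hgood hdash hlen hinv
    by_cases hmem : c ∈ p
    · -- repeated character: must be a digit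
      have hdig : isDig c := by
        rcases hgood c (by simp) with h | h
        · exact h
        · exfalso
          subst h
          have h1 : 1 ≤ p.count '-' := List.count_pos_iff.mpr hmem
          have : (p ++ '-' :: rest).count '-' = p.count '-' + ('-' :: rest).count '-' :=
            List.count_append ..
          rw [List.count_cons_self] at this
          omega
      have hcnt : 1 ≤ p.count c := List.count_pos_iff.mpr hmem
      have hval := hinv c hdig
      have hidx := pyIntDigit_toNat_lt hdig
      -- facts common to both taken branches
      have hsplit : p ++ c :: rest = (p ++ [c]) ++ rest := by simp
      have hset : PySem.Set.ofList (p ++ [c]) = PySem.Set.ofList p := set_ofList_append_mem hmem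
      have hcount_ne : ∀ x : Char, x ≠ c → (p ++ [c]).count x = p.count x := by
        intro x hx
        rw [List.count_append, List.count_singleton]
        simp [Ne.symm hx]
      have hcount_c : (p ++ [c]).count c = p.count c + 1 := by
        rw [List.count_append, List.count_singleton]
        simp
      have hinv' : ∀ c' : Char, isDig c' →
          (count.set (pyIntDigit c).toNat (count.getD (pyIntDigit c).toNat 0 + 1)).getD
            (pyIntDigit c').toNat 0 = max (((p ++ [c]).count c' : Int) - 1) 0 := by
        intro c' hdig'
        by_cases he : (pyIntDigit c').toNat = (pyIntDigit c).toNat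
        · have hcc : c' = c := pyIntDigit_toNat_inj hdig' hdig he
          subst hcc
          rw [he, List.getD_eq_getElem?_getD, List.getElem?_set_self (by omega), Option.getD_some,
            hcount_c, hval]
          push_cast
          omega
        · rw [List.getD_eq_getElem?_getD, List.getElem?_set_ne (by omega),
            ← List.getD_eq_getElem?_getD, hinv c' hdig',
            hcount_ne c' (fun hcc => he (by rw [hcc]))]
      have hgood' : ∀ x ∈ (p ++ [c]) ++ rest, isDig x ∨ x = '-' := by
        rw [← hsplit]; exact hgood
      have hdash' : ((p ++ [c]) ++ rest).count '-' ≤ 1 := by rw [← hsplit]; exact hdash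
      have hlen' : (count.set (pyIntDigit c).toNat (count.getD (pyIntDigit c).toNat 0 + 1)).length
          = 10 := by rw [List.length_set]; exact hlen
      by_cases hone : p.count c = 1
      · -- second occurrence: counter += 2*digit
        have hz : count.getD (pyIntDigit c).toNat 0 = 0 := by rw [hval, hone]; simp
        have hsum : ((PySem.Set.ofList p).map (W p)).sum + pyIntDigit c * 2
            = ((PySem.Set.ofList (p ++ [c])).map (W (p ++ [c]))).sum := by
          rw [hset, sum_map_update (PySem.Set.ofList p) (W p) (W (p ++ [c])) c
            (PySem.Set.nodup_ofList p) ((PySem.Set.mem_ofList ..).mpr hmem)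
            (fun x _ hx => by simp only [W, hcount_ne x hx])]
          have h1 : W p c = 0 := by simp only [W, hone]; norm_num
          have h2 : W (p ++ [c]) c = pyIntDigit c * 2 := by
            simp only [W, hcount_c, hone]; norm_num
          rw [h1, h2]; ring
        simp only [fLoop, if_pos ((PySem.Set.mem_ofList ..).mpr hmem), if_pos hz]
        rw [hsum, hsplit, ← hset]
        exact ih (p ++ [c]) _ hgood' hdash' hlen' hinv'
      · -- third or later occurrence: counter += digit
        have h2le : 2 ≤ p.count c := by omega
        have hz : ¬ count.getD (pyIntDigit c).toNat 0 = 0 := by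
          rw [hval]; omega
        have hpos : 0 < count.getD (pyIntDigit c).toNat 0 := by
          rw [hval]; omega
        have hsum : ((PySem.Set.ofList p).map (W p)).sum + pyIntDigit c
            = ((PySem.Set.ofList (p ++ [c])).map (W (p ++ [c]))).sum := by
          rw [hset, sum_map_update (PySem.Set.ofList p) (W p) (W (p ++ [c])) c
            (PySem.Set.nodup_ofList p) ((PySem.Set.mem_ofList ..).mpr hmem)
            (fun x _ hx => by simp only [W, hcount_ne x hx])]
          have h1 : W p c = pyIntDigit c * (p.count c : Int) := by
            simp only [W, if_pos (by omega : 2 ≤ (p.count c : Int))]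
          have h2 : W (p ++ [c]) c = pyIntDigit c * ((p.count c : Int) + 1) := by
            simp only [W, hcount_c]
            rw [if_pos (by push_cast; omega)]
            push_cast
            ring
          rw [h1, h2]; ring
        simp only [fLoop, if_pos ((PySem.Set.mem_ofList ..).mpr hmem), if_neg hz, if_pos hpos]
        rw [hsum, hsplit, ← hset]
        exact ih (p ++ [c]) _ hgood' hdash' hlen' hinv'
    · -- first occurrence: appended to numbers, counter and count unchanged
      have hsplit : p ++ c :: rest = (p ++ [c]) ++ rest := by simp
      have hset : PySem.Set.ofList (p ++ [c]) = PySem.Set.ofList p ++ [c] :=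
        set_ofList_append_not_mem hmem
      have hcount_ne : ∀ x : Char, x ≠ c → (p ++ [c]).count x = p.count x := by
        intro x hx
        rw [List.count_append, List.count_singleton]
        simp [Ne.symm hx]
      have hcount_c : (p ++ [c]).count c = 1 := by
        rw [List.count_append, List.count_singleton]
        simp [List.count_eq_zero.mpr hmem]
      have hinv' : ∀ c' : Char, isDig c' →
          count.getD (pyIntDigit c').toNat 0 = max (((p ++ [c]).count c' : Int) - 1) 0 := by
        intro c' hdig'
        by_cases hcc : c' = c
        · subst hcc
          rw [hinv c' hdig', hcount_c, List.count_eq_zero.mpr hmem]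
          simp
        · rw [hinv c' hdig', hcount_ne c' hcc]
      have hsum : ((PySem.Set.ofList p).map (W p)).sum
          = ((PySem.Set.ofList (p ++ [c])).map (W (p ++ [c]))).sum := by
        rw [hset, List.map_append, List.sum_append]
        have h1 : (PySem.Set.ofList p).map (W (p ++ [c])) = (PySem.Set.ofList p).map (W p) := by
          apply List.map_congr_left
          intro x hx
          have hxc : x ≠ c := fun he => hmem (he ▸ (PySem.Set.mem_ofList ..).mp hx)
          simp only [W, hcount_ne x hxc]
        have h2 : W (p ++ [c]) c = 0 := by
          simp only [W, hcount_c]; norm_num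
        rw [h1]; simp [h2]
      have hgood' : ∀ x ∈ (p ++ [c]) ++ rest, isDig x ∨ x = '-' := by
        rw [← hsplit]; exact hgood
      have hdash' : ((p ++ [c]) ++ rest).count '-' ≤ 1 := by rw [← hsplit]; exact hdash
      simp only [fLoop, if_neg (fun h => hmem ((PySem.Set.mem_ofList ..).mp h))]
      rw [hsum, hsplit, ← hset]
      exact ih (p ++ [c]) count hgood' hdash' hlen hinv'

theorem init_count_getD (i : Nat) : ([0, 0, 0, 0, 0, 0, 0, 0, 0, 0] : List Int).getD i 0 = 0 := by
  rcases i with _|_|_|_|_|_|_|_|_|_|i <;> rfl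

-- ===== VERDICT (by name: the statement is the Claim_ definition above) =====
theorem f_spec : Claim_equal_f := by
  intro n _
  show f n = f_alt n
  rw [f_alt_eq]
  have := fLoop_inv (PySem.Int.toChars n) [] [0, 0, 0, 0, 0, 0, 0, 0, 0, 0]
    (by simpa using toChars_good n) (by simpa using toChars_dash n) (by rfl)
    (fun c _ => by rw [init_count_getD]; simp)
  simpa [PySem.Set.ofList, f] using this
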